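-- pv_equiv track=rewrite | github.com/NJUNLP/trans0 | modules/metrics.py | calculate_cum_size
-- ===== SOURCE A (Python) =====
-- def calculate_cum_size(arrays):
--     cum_size = []
--     start_index = 0
--     for array in arrays:
--         end_index = start_index + len(array)
--         cum_size.append([start_index, end_index])
--         start_index = end_index
--     return cum_size
-- ===== SOURCE B (Python) =====
-- import itertools
--
-- def calculate_cum_size(arrays):
--     lens = [len(a) for a in arrays]
--     ends = list(itertools.accumulate(lens))
--     starts = [0] + ends[:-1]
--     return [[s, e] for s, e in zip(starts, ends)]
-- ===== Notes on version B (the rewrite author's own statement) =====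
-- stated objective: alternative
-- what changed: Replaces the single fused running-accumulator loop by three shaped passes: map lengths, prefix-sum them into endpoints, then zip shifted starts with ends into pairs.
import Mathlib
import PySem

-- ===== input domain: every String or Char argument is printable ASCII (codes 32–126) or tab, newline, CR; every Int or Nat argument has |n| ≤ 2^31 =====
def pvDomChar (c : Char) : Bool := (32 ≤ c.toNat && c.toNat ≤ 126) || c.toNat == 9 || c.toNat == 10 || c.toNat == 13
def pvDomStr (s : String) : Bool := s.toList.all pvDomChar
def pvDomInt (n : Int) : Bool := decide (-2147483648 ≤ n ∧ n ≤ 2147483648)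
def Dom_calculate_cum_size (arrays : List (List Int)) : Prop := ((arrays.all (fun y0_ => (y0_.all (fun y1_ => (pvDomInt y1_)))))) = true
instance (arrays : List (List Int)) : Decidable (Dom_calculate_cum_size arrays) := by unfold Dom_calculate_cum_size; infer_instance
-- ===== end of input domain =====

-- B replaces A's single fused running-accumulator loop by three shaped passes
-- (lengths → prefix sums → zip into pairs); objective: alternative decomposition, same cost.

-- ===== PORT A =====
-- A: one loop keeping (cum_size, start_index), appending [start, end] each step.
def calculate_cum_size (arrays : List (List Int)) : List (List Int) :=
  (arrays.foldl
    (fun (st : List (List Int) × Int) array =>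
      let end_index := st.2 + (array.length : Int)
      (st.1 ++ [[st.2, end_index]], end_index))
    ([], 0)).1

-- ===== PORT B =====
-- itertools.accumulate on a list of ints (prefix sums), ported step for step.
def pvAccum (s : Int) : List Int → List Int
  | [] => []
  | l :: ls => (s + l) :: pvAccum (s + l) ls

-- ends[:-1] is exactly List.dropLast (also [] on the empty list).
def calculate_cum_size_alt (arrays : List (List Int)) : List (List Int) :=
  let lens := arrays.map (fun a => (a.length : Int))
  let ends := pvAccum 0 lens
  let starts := 0 :: ends.dropLast
  List.zipWith (fun s e => [s, e]) starts ends

-- ===== PRECONDITION & SPEC =====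
def Spec_calculate_cum_size (arrays : List (List Int)) (out : List (List Int)) : Prop := out = calculate_cum_size_alt arrays
instance (arrays : List (List Int)) (out : List (List Int)) : Decidable (Spec_calculate_cum_size arrays out) := by unfold Spec_calculate_cum_size; infer_instance

-- ===== CLAIM (what is proved, stated in full; the proofs are below) =====
def Claim_equal_calculate_cum_size : Prop := ∀ (arrays : List (List Int)), Dom_calculate_cum_size arrays → Spec_calculate_cum_size arrays (calculate_cum_size arrays)

-- ===== LEMMAS AND PROOFS =====

-- Common characterisation of both sides: pairs s arrays.
def pvPairs (s : Int) : List (List Int) → List (List Int)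
  | [] => []
  | a :: r => [s, s + (a.length : Int)] :: pvPairs (s + (a.length : Int)) r

theorem pvA_loop (arrays : List (List Int)) : ∀ (acc : List (List Int)) (s : Int),
    (arrays.foldl
      (fun (st : List (List Int) × Int) array =>
        let end_index := st.2 + (array.length : Int)
        (st.1 ++ [[st.2, end_index]], end_index))
      (acc, s)).1 = acc ++ pvPairs s arrays := by
  induction arrays with
  | nil => intro acc s; simp [pvPairs]
  | cons a r ih =>
    intro acc s
    simp only [List.foldl_cons, pvPairs]
    rw [ih]
    simp

theorem pvZip_dropLast (f : Int → Int → List Int) (t : List Int) (x : Int) :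
    List.zipWith f ((x :: t).dropLast) t = List.zipWith f (x :: t.dropLast) t := by
  cases t <;> simp

theorem pvB_loop (arrays : List (List Int)) : ∀ (s : Int),
    List.zipWith (fun a b => [a, b]) (s :: (pvAccum s (arrays.map (fun a => (a.length : Int)))).dropLast)
      (pvAccum s (arrays.map (fun a => (a.length : Int)))) = pvPairs s arrays := by
  induction arrays with
  | nil => intro s; simp [pvAccum, pvPairs]
  | cons a r ih =>
    intro s
    simp only [List.map_cons, pvAccum, pvPairs, List.zipWith_cons_cons,
      pvZip_dropLast (fun a b => [a, b]) (pvAccum (s + (a.length : Int)) (r.map (fun a => (a.length : Int))))]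
    rw [ih]

-- ===== VERDICT (by name: the statement is the Claim_ definition above) =====
theorem calculate_cum_size_spec : Claim_equal_calculate_cum_size := by
  intro arrays _
  unfold Spec_calculate_cum_size calculate_cum_size calculate_cum_size_alt
  rw [pvA_loop arrays [] 0, pvB_loop arrays 0]
  simp
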